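-- pv_equiv track=rewrite | github.com/ChenDaiwei-99/compositional-something | self/self_improvement_tasks.py | leftmost_max_run_pair
-- ===== SOURCE A (Python) =====
-- from typing import Any, Callable, Dict, List, Optional, Sequence, Tuple
--
-- def leftmost_max_run_pair(bitstring: str) -> Tuple[str, int]:
--     if not bitstring:
--         return "", 0
--     best_symbol = bitstring[0]
--     best_length = 1
--     current_symbol = bitstring[0]
--     current_length = 1
--     for ch in bitstring[1:]:
--         if ch == current_symbol:
--             current_length += 1
--         else:
--             current_symbol = ch
--             current_length = 1
--         if current_length > best_length:
--             best_symbol = current_symbol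
--             best_length = current_length
--     return best_symbol, best_length
-- ===== SOURCE B (Python) =====
-- def leftmost_max_run_pair(bitstring):
--     runs = []
--     i = 0
--     n = len(bitstring)
--     while i < n:
--         j = i
--         while j < n and bitstring[j] == bitstring[i]:
--             j += 1
--         runs.append((bitstring[i], j - i))
--         i = j
--     best_symbol, best_length = "", 0
--     for sym, length in runs:
--         if length > best_length:
--             best_symbol, best_length = sym, length
--     return best_symbol, best_length
-- ===== Notes on version B (the rewrite author's own statement) =====
-- stated objective: alternative
-- what changed: B first decomposes the string into (symbol, run-length) pairs with a two-pointer scan and then reduces the run list with a strict-> fold from ('',0), replacing A's single char-by-char state machine that tracks best and current run simultaneously.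
import Mathlib
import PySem

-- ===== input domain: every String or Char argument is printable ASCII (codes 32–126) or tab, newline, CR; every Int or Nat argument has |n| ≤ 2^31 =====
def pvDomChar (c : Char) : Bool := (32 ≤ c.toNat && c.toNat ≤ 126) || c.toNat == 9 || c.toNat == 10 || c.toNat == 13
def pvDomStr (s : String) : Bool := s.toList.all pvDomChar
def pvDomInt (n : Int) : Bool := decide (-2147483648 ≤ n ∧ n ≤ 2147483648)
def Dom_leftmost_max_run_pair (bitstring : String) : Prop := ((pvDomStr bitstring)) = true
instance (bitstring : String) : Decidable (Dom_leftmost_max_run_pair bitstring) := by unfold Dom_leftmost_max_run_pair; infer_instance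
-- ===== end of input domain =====

-- B decomposes the string into (symbol, run-length) pairs and reduces them with a strict-> fold,
-- replacing A's single char-by-char best/current state machine; same cost, different decomposition.


-- ===== PORT A =====
-- A's loop state: (best_symbol, best_length, current_symbol, current_length)
def pvStepA (st : String × Int × Char × Int) (ch : Char) : String × Int × Char × Int :=
  let (bs, bl, cus, cul) := st
  let (cus', cul') := if ch == cus then (cus, cul + 1) else (ch, (1 : Int))
  if cul' > bl then (String.ofList [cus'], cul', cus', cul') else (bs, bl, cus', cul')

def leftmost_max_run_pair (bitstring : String) : String × Int :=
  match bitstring.toList with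
  | [] => ("", 0)
  | c :: cs =>
    let st := cs.foldl pvStepA (String.ofList [c], 1, c, 1)
    (st.1, st.2.1)

-- ===== PORT B =====
-- phase 1 of Source B: the inner while loop advances past the equal prefix (takeWhile/dropWhile)
def pvRuns : List Char → List (Char × Int)
  | [] => []
  | c :: cs =>
    (c, (cs.takeWhile (· == c)).length + 1) :: pvRuns (cs.dropWhile (· == c))
termination_by l => l.length
decreasing_by
  simp only [List.length_cons]
  exact Nat.lt_succ_of_le (List.length_dropWhile_le _ _)

-- phase 2 of Source B: strict-> fold over the run list
def pvBestStep (b : String × Int) (r : Char × Int) : String × Int :=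
  if r.2 > b.2 then (String.ofList [r.1], r.2) else b

def leftmost_max_run_pair_alt (bitstring : String) : String × Int :=
  (pvRuns bitstring.toList).foldl pvBestStep ("", 0)

-- ===== PRECONDITION & SPEC =====
def Spec_leftmost_max_run_pair (bitstring : String) (out : String × Int) : Prop := out = leftmost_max_run_pair_alt bitstring
instance (bitstring : String) (out : String × Int) : Decidable (Spec_leftmost_max_run_pair bitstring out) := by unfold Spec_leftmost_max_run_pair; infer_instance

-- ===== CLAIM (what is proved, stated in full; the proofs are below) =====
def Claim_equal_leftmost_max_run_pair : Prop := ∀ (bitstring : String), Dom_leftmost_max_run_pair bitstring → Spec_leftmost_max_run_pair bitstring (leftmost_max_run_pair bitstring)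

-- ===== LEMMAS AND PROOFS =====

theorem pvRuns_nil : pvRuns [] = [] := by
  rw [pvRuns]

theorem pvRuns_cons_eq (c : Char) (cs : List Char) :
    pvRuns (c :: cs) = (c, ((cs.takeWhile (· == c)).length : Int) + 1)
      :: pvRuns (cs.dropWhile (· == c)) := by
  rw [pvRuns]

-- runs with the leading run pre-loaded with `cul` already-seen copies of `cus`
def pvRunsC (cus : Char) (cul : Int) (cs : List Char) : List (Char × Int) :=
  (cus, cul + (cs.takeWhile (· == cus)).length) :: pvRuns (cs.dropWhile (· == cus))

theorem pvRuns_cons (c : Char) (cs : List Char) :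
    pvRuns (c :: cs) = pvRunsC c 1 cs := by
  rw [pvRuns_cons_eq, pvRunsC, Int.add_comm]

theorem pvStepA_same (bs : String) (bl : Int) (cus : Char) (cul : Int) :
    pvStepA (bs, bl, cus, cul) cus
      = if cul + 1 > bl then (String.ofList [cus], cul + 1, cus, cul + 1)
        else (bs, bl, cus, cul + 1) := by
  simp [pvStepA]

theorem pvStepA_diff (bs : String) (bl : Int) (cus ch : Char) (cul : Int)
    (h : ¬ ch = cus) (hb : ¬ (1 : Int) > bl) :
    pvStepA (bs, bl, cus, cul) ch = (bs, bl, ch, 1) := by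
  simp [pvStepA, h, hb]

-- the first fold step gives the same state from (bs,bl) and from the A-updated state,
-- because the head run's length dominates the current-run length
theorem pvBestStep_head (bs bs' : String) (bl bl' cul : Int) (cus : Char) (t : Nat)
    (h : (cul > bl ∧ bs' = String.ofList [cus] ∧ bl' = cul) ∨ (cul ≤ bl ∧ bs' = bs ∧ bl' = bl)) :
    pvBestStep (bs, bl) (cus, cul + t) = pvBestStep (bs', bl') (cus, cul + t) := by
  rcases h with ⟨h1, rfl, h3⟩ | ⟨h1, rfl, rfl⟩
  · rw [h3] at *
    have hL : cul + (t : Int) > bl := by omega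
    simp only [pvBestStep, if_pos hL]
    by_cases ht : (t : Int) > 0
    · rw [if_pos (by omega)]
    · have h0 : (t : Int) = 0 := by omega
      rw [if_neg (by omega), h0, add_zero]
  · rfl

-- main invariant: A's loop from state (bs, bl, cus, cul) with 1 ≤ cul ≤ bl computes
-- the fold of the remaining (pre-loaded) runs from (bs, bl)
theorem pvLoop_eq_fold (cs : List Char) : ∀ (bs : String) (bl : Int) (cus : Char) (cul : Int),
    1 ≤ cul → cul ≤ bl →
    (let st := cs.foldl pvStepA (bs, bl, cus, cul); (st.1, st.2.1))
      = (pvRunsC cus cul cs).foldl pvBestStep (bs, bl) := by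
  induction cs with
  | nil =>
    intro bs bl cus cul h1 h2
    simp only [List.foldl, pvRunsC, List.takeWhile_nil, List.dropWhile_nil, pvRuns_nil]
    simp only [List.length_nil, Int.natCast_zero, add_zero, pvBestStep]
    have h3 : ¬ cul > bl := by omega
    simp [h3]
  | cons ch cs ih =>
    intro bs bl cus cul h1 h2
    by_cases hc : ch = cus
    · subst hc
      -- same char: current length grows; best possibly updated
      have htw : List.takeWhile (fun x => x == ch) (ch :: cs)
          = ch :: List.takeWhile (fun x => x == ch) cs := List.takeWhile_cons_of_pos (by simp)
      have hdw : List.dropWhile (fun x => x == ch) (ch :: cs)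
          = List.dropWhile (fun x => x == ch) cs := List.dropWhile_cons_of_pos (by simp)
      have harith : cul + ((List.length (List.takeWhile (fun x => x == ch) cs) + 1 : Nat) : Int)
          = (cul + 1) + ((List.takeWhile (fun x => x == ch) cs).length : Int) := by
        push_cast; ring
      rw [List.foldl_cons, pvStepA_same]
      by_cases hb : cul + 1 > bl
      · rw [if_pos hb, ih (String.ofList [ch]) (cul + 1) ch (cul + 1) (by omega) le_rfl]
        simp only [pvRunsC, htw, hdw, List.length_cons, List.foldl_cons, harith]
        rw [pvBestStep_head bs (String.ofList [ch]) bl (cul + 1) (cul + 1) ch _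
          (Or.inl ⟨hb, rfl, rfl⟩)]
      · rw [if_neg hb, ih bs bl ch (cul + 1) (by omega) (by omega)]
        simp only [pvRunsC, htw, hdw, List.length_cons, harith]
    · -- new run starts at ch
      have htw : List.takeWhile (fun x => x == cus) (ch :: cs) = [] :=
        List.takeWhile_cons_of_neg (by simp [hc])
      have hdw : List.dropWhile (fun x => x == cus) (ch :: cs) = ch :: cs :=
        List.dropWhile_cons_of_neg (by simp [hc])
      rw [List.foldl_cons, pvStepA_diff bs bl cus ch cul hc (by omega),
        ih bs bl ch 1 le_rfl (by omega)]
      simp only [pvRunsC, htw, hdw, List.length_nil, Int.natCast_zero, add_zero,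
        List.foldl_cons, pvRuns_cons, pvRunsC]
      have hstep : pvBestStep (bs, bl) (cus, cul) = (bs, bl) := by
        simp [pvBestStep, show ¬ cul > bl by omega]
      rw [hstep]

-- ===== VERDICT (by name: the statement is the Claim_ definition above) =====
theorem leftmost_max_run_pair_spec : Claim_equal_leftmost_max_run_pair := by
  intro bitstring _
  unfold Spec_leftmost_max_run_pair leftmost_max_run_pair leftmost_max_run_pair_alt
  cases h : bitstring.toList with
  | nil => simp [pvRuns_nil]
  | cons c cs =>
    simp only
    rw [pvLoop_eq_fold cs (String.ofList [c]) 1 c 1 le_rfl le_rfl, pvRuns_cons]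
    simp only [pvRunsC, List.foldl_cons]
    rw [pvBestStep_head "" (String.ofList [c]) 0 1 1 c _ (Or.inl ⟨by omega, rfl, rfl⟩)]
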